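-- pv_equiv track=rewrite | github.com/oksifun/gis-300 | backend/app/accruals/cipca/source_data/meters.py | _sum_volumes
-- ===== SOURCE A (Python) =====
-- def _sum_volumes(volumes):
--     """
--     Суммирование объемов по счетчикам в зависимости
--     от их тарифности
--     :param volumes: list: список из списков с объемами за период
--     :return: list: список со списком просуммированных объемов для тарифов
--     """
--     volumes = [x for x in volumes if x]
--     # Все возможные варианты тарифных счетчиков
--     tariff_count = (([x for x in volumes if len(x) == 1], 1),
--                     ([x for x in volumes if len(x) == 2], 2),
--                     ([x for x in volumes if len(x) == 3], 3))
--     result = []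
--     for tar in tariff_count:
--         if tar[0]:
--             # Суммирование объемов по тарифам
--             tar_value = [sum([x[i] for x in tar[0]]) for i in range(tar[1])]
--             result.append(tar_value)
--     return result
-- ===== SOURCE B (Python) =====
-- def _sum_volumes(volumes):
--     """One-pass re-implementation: running per-tariff sums instead of
--     three filter-and-sum scans."""
--     s1 = s2 = s3 = None
--     for row in volumes:
--         n = len(row)
--         if n == 1:
--             s1 = list(row) if s1 is None else [a + b for a, b in zip(s1, row)]
--         elif n == 2:
--             s2 = list(row) if s2 is None else [a + b for a, b in zip(s2, row)]
--         elif n == 3: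
--             s3 = list(row) if s3 is None else [a + b for a, b in zip(s3, row)]
--     return [s for s in (s1, s2, s3) if s is not None]
-- ===== Notes on version B (the rewrite author's own statement) =====
-- stated objective: alternative
-- what changed: B makes a single pass keeping one running sum list per tariff count (1/2/3) and emits the non-empty ones in order, instead of A's filter of truthy rows followed by three separate filter-and-column-sum scans.
import Mathlib
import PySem

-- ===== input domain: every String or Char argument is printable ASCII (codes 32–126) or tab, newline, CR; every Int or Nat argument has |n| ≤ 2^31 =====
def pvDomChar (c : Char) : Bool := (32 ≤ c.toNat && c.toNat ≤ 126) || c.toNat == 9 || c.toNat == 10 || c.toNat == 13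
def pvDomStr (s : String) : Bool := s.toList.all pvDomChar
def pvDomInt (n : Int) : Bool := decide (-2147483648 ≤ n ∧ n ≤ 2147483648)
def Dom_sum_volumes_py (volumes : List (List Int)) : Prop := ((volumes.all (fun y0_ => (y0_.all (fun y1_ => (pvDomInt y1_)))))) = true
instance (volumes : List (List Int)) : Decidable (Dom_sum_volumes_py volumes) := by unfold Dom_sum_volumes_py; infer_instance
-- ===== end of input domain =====

-- B replaces A's truthy-filter plus three filter-and-column-sum scans by a single pass that
-- keeps one running sum list per tariff count (alternative decomposition, same asymptotic cost).

-- ===== PORT A =====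
-- x[i] is always in range here (i < tar.2 = len x for every x in the group), so getD is exact.
def sum_volumes_py (volumes : List (List Int)) : List (List Int) :=
  let vs := volumes.filter (fun x => !x.isEmpty)
  let tariff_count : List (List (List Int) × Nat) :=
    [(vs.filter (fun x => x.length == 1), 1),
     (vs.filter (fun x => x.length == 2), 2),
     (vs.filter (fun x => x.length == 3), 3)]
  tariff_count.foldl
    (fun result tar =>
      if !tar.1.isEmpty then
        result ++ [(List.range tar.2).map (fun i => (tar.1.map (fun x => x.getD i 0)).sum)]
      else result) []

-- ===== PORT B =====
-- [a + b for a, b in zip(s, row)]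
def pvZipAdd (a b : List Int) : List Int := (a.zip b).map (fun p => p.1 + p.2)

-- one iteration of B's loop over the state (s1, s2, s3)
def pvStep (s : Option (List Int) × Option (List Int) × Option (List Int)) (row : List Int) :
    Option (List Int) × Option (List Int) × Option (List Int) :=
  let n := row.length
  if n == 1 then (some (match s.1 with | none => row | some a => pvZipAdd a row), s.2.1, s.2.2)
  else if n == 2 then (s.1, some (match s.2.1 with | none => row | some a => pvZipAdd a row), s.2.2)
  else if n == 3 then (s.1, s.2.1, some (match s.2.2 with | none => row | some a => pvZipAdd a row))
  else s

def sum_volumes_py_alt (volumes : List (List Int)) : List (List Int) :=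
  let s := volumes.foldl pvStep (none, none, none)
  [s.1, s.2.1, s.2.2].filterMap id

-- ===== PRECONDITION & SPEC =====
def Spec_sum_volumes_py (volumes : List (List Int)) (out : List (List Int)) : Prop := out = sum_volumes_py_alt volumes
instance (volumes : List (List Int)) (out : List (List Int)) : Decidable (Spec_sum_volumes_py volumes out) := by unfold Spec_sum_volumes_py; infer_instance

-- ===== CLAIM (what is proved, stated in full; the proofs are below) =====
def Claim_equal_sum_volumes_py : Prop := ∀ (volumes : List (List Int)), Dom_sum_volumes_py volumes → Spec_sum_volumes_py volumes (sum_volumes_py volumes)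

-- ===== LEMMAS AND PROOFS =====

-- B's update restricted to one component
def pvStepN (n : Nat) (o : Option (List Int)) (row : List Int) : Option (List Int) :=
  if row.length == n then some (match o with | none => row | some a => pvZipAdd a row) else o

-- A's column-sum value for one group
def pvColSums (n : Nat) (g : List (List Int)) : List Int :=
  (List.range n).map (fun i => (g.map (fun x => x.getD i 0)).sum)

lemma pvStep_components (vs : List (List Int))
    (s : Option (List Int) × Option (List Int) × Option (List Int)) :
    vs.foldl pvStep s =
      (vs.foldl (pvStepN 1) s.1, vs.foldl (pvStepN 2) s.2.1, vs.foldl (pvStepN 3) s.2.2) := by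
  induction vs generalizing s with
  | nil => rfl
  | cons r vs ih =>
    simp only [List.foldl_cons, ih]
    congr 1 <;> [skip; congr 1] <;>
      (simp only [pvStep, pvStepN]; split_ifs with h1 h2 h3 <;> simp_all)

lemma pvStepN_some (n : Nat) (vs : List (List Int)) (s : List Int) :
    vs.foldl (pvStepN n) (some s) =
      some ((vs.filter (fun x => x.length == n)).foldl pvZipAdd s) := by
  induction vs generalizing s with
  | nil => rfl
  | cons r vs ih =>
    by_cases h : r.length = n <;>
      simp [pvStepN, h, ih]

lemma pvStepN_none (n : Nat) (vs : List (List Int)) :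
    vs.foldl (pvStepN n) none =
      match vs.filter (fun x => x.length == n) with
      | [] => none
      | r :: rest => some (rest.foldl pvZipAdd r) := by
  induction vs with
  | nil => rfl
  | cons r vs ih =>
    by_cases h : r.length = n <;>
      simp [pvStepN, h, ih, pvStepN_some]

lemma pvZipAdd_length (a b : List Int) (ha : a.length = n) (hb : b.length = n) :
    (pvZipAdd a b).length = n := by
  simp [pvZipAdd, ha, hb]

lemma pvSelfMap (s : List Int) : (List.range s.length).map (fun i => s.getD i 0) = s := by
  apply List.ext_getElem
  · simp
  · intro i h1 h2
    simp only [List.getElem_map, List.getElem_range]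
    simp [List.getD_eq_getElem?_getD, List.getElem?_eq_getElem h2]

lemma pvZipAdd_getD (a b : List Int) (ha : a.length = n) (hb : b.length = n)
    (i : Nat) (hi : i < n) : (pvZipAdd a b).getD i 0 = a.getD i 0 + b.getD i 0 := by
  simp [pvZipAdd, List.getD_eq_getElem?_getD, ha, hb, hi, List.getElem_zip]

lemma pvFoldAdd (n : Nat) (rest : List (List Int)) (s : List Int) (hs : s.length = n)
    (hr : ∀ r ∈ rest, r.length = n) :
    rest.foldl pvZipAdd s =
      (List.range n).map (fun i => s.getD i 0 + ((rest.map (fun x => x.getD i 0)).sum)) := by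
  induction rest generalizing s with
  | nil => simpa using (hs ▸ pvSelfMap s).symm
  | cons r rest ih =>
    have hrn : r.length = n := hr r (by simp)
    rw [List.foldl_cons, ih (pvZipAdd s r) (pvZipAdd_length s r hs hrn)
      (fun x hx => hr x (by simp [hx]))]
    apply List.map_congr_left
    intro i hi
    rw [pvZipAdd_getD s r hs hrn i (List.mem_range.mp hi)]
    simp [add_assoc]

lemma pvGroup_sums (n : Nat) (vs : List (List Int)) (r : List Int) (rest : List (List Int))
    (h : vs.filter (fun x => x.length == n) = r :: rest) :
    rest.foldl pvZipAdd r = pvColSums n (r :: rest) := by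
  have hall : ∀ x ∈ r :: rest, x.length = n := by
    intro x hx
    have := List.of_mem_filter (h ▸ hx)
    simpa using this
  rw [pvFoldAdd n rest r (hall r (by simp)) (fun x hx => hall x (by simp [hx]))]
  simp [pvColSums]

-- the truthy filter is absorbed by the length filter for n ≥ 1
lemma pvFilter_truthy (volumes : List (List Int)) (n : Nat) (hn : n ≠ 0) :
    (volumes.filter (fun x => !x.isEmpty)).filter (fun x => x.length == n) =
      volumes.filter (fun x => x.length == n) := by
  rw [List.filter_filter]
  apply List.filter_congr
  intro x _
  cases x <;> simp_all <;> omega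

lemma pvComp (n : Nat) (volumes : List (List Int)) :
    (match volumes.filter (fun x => x.length == n) with
     | [] => (none : Option (List Int))
     | r :: rest => some (rest.foldl pvZipAdd r)) =
    (if (volumes.filter (fun x => x.length == n)).isEmpty then none
     else some (pvColSums n (volumes.filter (fun x => x.length == n)))) := by
  rcases h : volumes.filter (fun x => x.length == n) with _ | ⟨r, rest⟩
  · rw [h]
    rfl
  · rw [h]
    exact congrArg some (pvGroup_sums n volumes r rest h)

-- ===== VERDICT (by name: the statement is the Claim_ definition above) =====
theorem sum_volumes_py_spec : Claim_equal_sum_volumes_py := by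
  intro volumes _
  unfold Spec_sum_volumes_py sum_volumes_py sum_volumes_py_alt
  rw [pvStep_components]
  simp only [pvStepN_none, pvFilter_truthy volumes 1 (by omega),
    pvFilter_truthy volumes 2 (by omega), pvFilter_truthy volumes 3 (by omega), pvComp]
  cases e1 : (volumes.filter (fun x => x.length == 1)).isEmpty <;>
  cases e2 : (volumes.filter (fun x => x.length == 2)).isEmpty <;>
  cases e3 : (volumes.filter (fun x => x.length == 3)).isEmpty <;>
    (simp only [List.isEmpty_iff, List.isEmpty_eq_false_iff] at e1 e2 e3;
     simp [-List.filter_eq_nil_iff, e1, e2, e3, pvColSums])
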